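-- pv_equiv track=rewrite | github.com/mimiha1998/dataset | alter translationese45/helpfunctions.py | sents_num
-- ===== SOURCE A (Python) =====
-- def sents_num(trees, lang):
-- 	sentnum = 0
-- 	if lang == 'en':
-- 		for tree in trees:
-- 			lastwd = tree[-1]
-- 			if not lastwd[2] in [':', ';', 'Mr.', 'Dr.']:
-- 				sentnum += 1
-- 	if lang == 'de':
-- 		for tree in trees:
-- 			lastwd = tree[-1]
-- 			if not lastwd[2] in [':', ';', 'z.B.', 'Dr.']:
-- 				sentnum += 1
-- 	if lang == 'ru':
-- 		for tree in trees:
-- 			lastwd = tree[-1]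
-- 			if not lastwd[2] in [':', ';', 'Дж.']:
-- 				sentnum += 1  # this is a fair num-of-sents count for a file
--
-- 	return sentnum
-- ===== SOURCE B (Python) =====
-- EXCLUDED = {
--     'en': [':', ';', 'Mr.', 'Dr.'],
--     'de': [':', ';', 'z.B.', 'Dr.'],
--     'ru': [':', ';', 'Дж.'],
-- }
--
-- def sents_num(trees, lang):
--     if lang not in EXCLUDED:
--         return 0
--     # staged: first extract every sentence-final token, then count by complement:
--     # total sentences minus the occurrences of each excluded token (they are distinct).
--     finals = [tree[-1][2] for tree in trees]
--     return len(finals) - sum(finals.count(tok) for tok in EXCLUDED[lang])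
-- ===== Notes on version B (the rewrite author's own statement) =====
-- stated objective: alternative
-- what changed: Instead of A's three duplicated language-guarded accumulator loops that test each sentence against the token list, B works in stages and by complement: it extracts all sentence-final tokens into one list, then returns total sentence count minus the summed occurrence counts of each excluded token (valid because the excluded tokens are distinct); unknown languages return 0 via a table. Pre_ excludes only inputs where A raises IndexError (a known language with an empty tree or a last word of fewer than 3 fields); B raises there too.
import Mathlib
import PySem

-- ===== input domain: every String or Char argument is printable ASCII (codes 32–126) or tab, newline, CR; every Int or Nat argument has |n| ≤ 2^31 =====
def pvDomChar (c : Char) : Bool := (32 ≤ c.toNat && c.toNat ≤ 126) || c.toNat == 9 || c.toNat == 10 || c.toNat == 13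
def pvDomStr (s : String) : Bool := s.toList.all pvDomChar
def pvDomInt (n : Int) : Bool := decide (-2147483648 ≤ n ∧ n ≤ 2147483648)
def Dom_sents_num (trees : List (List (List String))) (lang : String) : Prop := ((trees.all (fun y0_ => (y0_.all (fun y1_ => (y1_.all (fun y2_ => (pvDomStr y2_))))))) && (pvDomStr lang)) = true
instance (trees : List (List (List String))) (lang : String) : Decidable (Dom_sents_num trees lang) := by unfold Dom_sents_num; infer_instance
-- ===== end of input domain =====

-- B replaces A's three duplicated language-guarded loops by staged complement counting:
-- extract the sentence-final tokens, then subtract each excluded token's occurrence count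
-- from the total (objective: alternative decomposition, same cost).

-- ===== PORT A =====
-- tree[-1] and lastwd[2] are ported with PySem.List.pyGetD; Pre_ guarantees both indices are in range,
-- so the defaults are never consulted on admitted inputs (Python raises IndexError exactly there).
def sents_num (trees : List (List (List String))) (lang : String) : Int :=
  let sentnum : Int := 0
  let sentnum :=
    if lang = "en" then
      trees.foldl (fun acc tree =>
        let lastwd := PySem.List.pyGetD tree (-1) []
        if ¬ (PySem.List.pyGetD lastwd 2 "" ∈ [":", ";", "Mr.", "Dr."]) then acc + 1 else acc) sentnum
    else sentnum
  let sentnum :=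
    if lang = "de" then
      trees.foldl (fun acc tree =>
        let lastwd := PySem.List.pyGetD tree (-1) []
        if ¬ (PySem.List.pyGetD lastwd 2 "" ∈ [":", ";", "z.B.", "Dr."]) then acc + 1 else acc) sentnum
    else sentnum
  let sentnum :=
    if lang = "ru" then
      trees.foldl (fun acc tree =>
        let lastwd := PySem.List.pyGetD tree (-1) []
        if ¬ (PySem.List.pyGetD lastwd 2 "" ∈ [":", ";", "Дж."]) then acc + 1 else acc) sentnum
    else sentnum
  sentnum

-- ===== PORT B =====
def sents_num_alt_table : PySem.Dict String (List String) :=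
  PySem.Dict.ofList [("en", [":", ";", "Mr.", "Dr."]),
   ("de", [":", ";", "z.B.", "Dr."]),
   ("ru", [":", ";", "Дж."])]

def sents_num_alt (trees : List (List (List String))) (lang : String) : Int :=
  match PySem.Dict.get? sents_num_alt_table lang with
  | none => 0
  | some excl =>
      let finals := trees.map (fun tree =>
        PySem.List.pyGetD (PySem.List.pyGetD tree (-1) []) 2 "")
      (finals.length : Int) -
        ((excl.map (fun tok => PySem.List.count finals tok)).sum : Int)

-- ===== PRECONDITION & SPEC =====
-- Pre_ excludes exactly the inputs where the Python A raises IndexError: for a known language,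
-- some tree is empty or its last word has fewer than 3 fields. B raises there too.
def Pre_sents_num (trees : List (List (List String))) (lang : String) : Prop :=
  (lang = "en" ∨ lang = "de" ∨ lang = "ru") →
    ∀ tree ∈ trees, tree ≠ [] ∧ 3 ≤ (tree.getLastD []).length

instance (trees : List (List (List String))) (lang : String) : Decidable (Pre_sents_num trees lang) := by
  unfold Pre_sents_num; infer_instance

def pvWitness_sents_num : List (List (List String)) × String :=
  ([[["a", "b", "x"]], [["c", "d", ":"]]], "en")

def Spec_sents_num (trees : List (List (List String))) (lang : String) (out : Int) : Prop := out = sents_num_alt trees lang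
instance (trees : List (List (List String))) (lang : String) (out : Int) : Decidable (Spec_sents_num trees lang out) := by unfold Spec_sents_num; infer_instance

-- ===== CLAIM (what is proved, stated in full; the proofs are below) =====
def Claim_equal_sents_num : Prop := ∀ (trees : List (List (List String))) (lang : String), Dom_sents_num trees lang → Pre_sents_num trees lang → Spec_sents_num trees lang (sents_num trees lang)

-- ===== LEMMAS AND PROOFS =====

theorem table_mk : sents_num_alt_table = PySem.Dict.mk
    [("en", [":", ";", "Mr.", "Dr."]), ("de", [":", ";", "z.B.", "Dr."]), ("ru", [":", ";", "Дж."])] := by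
  decide

-- A's counting fold equals countP shifted by the initial value.
theorem foldl_count (trees : List (List (List String))) (p : List (List String) → Prop)
    [DecidablePred p] (n : Int) :
    trees.foldl (fun acc tree => if p tree then acc + 1 else acc) n
      = n + (trees.countP (fun t => decide (p t)) : Int) := by
  induction trees generalizing n with
  | nil => simp
  | cons t ts ih =>
      simp only [List.foldl_cons, List.countP_cons, ih]
      by_cases h : p t
      · simp only [if_pos h, decide_eq_true h, if_pos]
        push_cast; ring
      · simp [h]

-- occurrences of x summed over a duplicate-free token list: 1 if x is listed, else 0.
theorem sum_ite_mem (excl : List String) (h : excl.Nodup) (x : String) :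
    (excl.map (fun tok => if x == tok then 1 else 0)).sum
      = (if x ∈ excl then 1 else 0 : Nat) := by
  induction excl with
  | nil => simp
  | cons t ts ih =>
      rcases List.nodup_cons.mp h with ⟨hnm, hnd⟩
      have ih' := ih hnd
      simp only [List.map_cons, List.sum_cons, beq_iff_eq] at ih' ⊢
      by_cases hx : x = t
      · subst hx
        simp [hnm, ih']
      · simp [hx, ih']

-- complement counting: summed per-token counts over a duplicate-free token list
-- equal the number of elements that lie in the list.
theorem sum_count (excl : List String) (h : excl.Nodup) (xs : List String) :
    (excl.map (fun tok => xs.count tok)).sum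
      = xs.countP (fun x => decide (x ∈ excl)) := by
  induction xs with
  | nil => simp
  | cons x xs ih =>
      have : (excl.map (fun tok => (x :: xs).count tok)).sum
          = (excl.map (fun tok => xs.count tok)).sum
            + (excl.map (fun tok => if x == tok then 1 else 0)).sum := by
        rw [← List.sum_map_add]
        refine congrArg List.sum (List.map_congr_left ?_)
        intro tok _
        simp only [List.count_cons]
      rw [this, ih, sum_ite_mem excl h x, List.countP_cons]
      by_cases hx : x ∈ excl <;> simp [hx]

-- the two counting schemes agree (Int-valued): direct countP of "not excluded"
-- versus length minus summed excluded-token counts after a map.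
theorem complement_eq (trees : List (List (List String))) (excl : List String)
    (h : excl.Nodup)
    (f : List (List String) → String) :
    ((trees.countP (fun t => decide (f t ∉ excl)) : Int))
      = ((trees.map f).length : Int)
        - ((excl.map (fun tok => (trees.map f).count tok)).sum : Int) := by
  rw [sum_count excl h]
  have h1 : (trees.map f).countP (fun x => decide (x ∈ excl))
      = trees.countP (fun t => decide (f t ∈ excl)) := by
    simp [List.countP_map, Function.comp_def]
  have h2 : trees.countP (fun t => decide (f t ∉ excl))
        + trees.countP (fun t => decide (f t ∈ excl)) = trees.length := by
    have hl := trees.length_eq_countP_add_countP (fun t => decide (f t ∈ excl))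
    have hc : (fun t : List (List String) => decide (f t ∉ excl))
        = (fun a : List (List String) => decide (¬ (decide (f a ∈ excl)) = true)) := by
      funext t; simp
    rw [hc]
    omega
  rw [h1]
  simp only [List.length_map]
  omega

-- ===== VERDICT (by name: the statement is the Claim_ definition above) =====
theorem sents_num_spec : Claim_equal_sents_num := by
  intro trees lang _ _
  unfold Spec_sents_num sents_num sents_num_alt
  by_cases h1 : lang = "en"
  · subst h1
    have hg : sents_num_alt_table.get? "en" = some [":", ";", "Mr.", "Dr."] := by decide
    have hn : ([":", ";", "Mr.", "Dr."] : List String).Nodup := by decide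
    simp only [hg, if_neg (by decide : ¬ ("en" : String) = "de"),
      if_neg (by decide : ¬ ("en" : String) = "ru"), foldl_count]
    rw [complement_eq _ _ hn]
    simp [PySem.List.count]
  · by_cases h2 : lang = "de"
    · subst h2
      have hg : sents_num_alt_table.get? "de" = some [":", ";", "z.B.", "Dr."] := by decide
      have hn : ([":", ";", "z.B.", "Dr."] : List String).Nodup := by decide
      simp only [hg, if_neg (by decide : ¬ ("de" : String) = "en"),
        if_neg (by decide : ¬ ("de" : String) = "ru"), foldl_count]
      rw [complement_eq _ _ hn]
      simp [PySem.List.count]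
    · by_cases h3 : lang = "ru"
      · subst h3
        have hg : sents_num_alt_table.get? "ru" = some [":", ";", "Дж."] := by decide
        have hn : ([":", ";", "Дж."] : List String).Nodup := by decide
        simp only [hg, if_neg (by decide : ¬ ("ru" : String) = "en"),
          if_neg (by decide : ¬ ("ru" : String) = "de"), foldl_count]
        rw [complement_eq _ _ hn]
        simp [PySem.List.count]
      · have h1' : "en" ≠ lang := fun h => h1 h.symm
        have h2' : "de" ≠ lang := fun h => h2 h.symm
        have h3' : "ru" ≠ lang := fun h => h3 h.symm
        have hg : sents_num_alt_table.get? lang = none := by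
          rw [table_mk]
          simp [PySem.Dict.get?, h1', h2', h3']
        simp [hg, h1, h2, h3]
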